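/- GENERATED by farm/mkstatement.py from design/units.tsv (unit `DGifGetExtensionNext.E`) and the assertions of Gif/Spec/Seg_DGifGetExtensionNext.lean — do not edit.
   THE STATEMENT of the proof unit `DGifGetExtensionNext.E`: segment E of `DGifGetExtensionNext` (10 instructions; entries 0x1098a6;
   exits ret; ranges 0x1098a6-0x1098c3)
   takes each of its entry assertions to one of its exit assertions (`Gif.Spec.DGifGetExtensionNext.SegE`), given the contracts of its callees.
   What the names mean: ProgX/Base/Spec/Basic.lean (the shared hypotheses), Gif/Spec/Seg_DGifGetExtensionNext.lean (the assertions). The theorem to prove: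
   `theorem DGifGetExtensionNext_E_ok : Gif.Spec.DGifGetExtensionNext_E.Statement`. -/
import Gif.Code
import Gif.Dec.All
import Gif.Labels
import Gif.Spec.Seg_DGifGetExtensionNext
namespace Gif.Spec.DGifGetExtensionNext_E
open X86 X86.User Asan

/-- The statement of unit `DGifGetExtensionNext.E`. -/
def Statement : Prop :=
  ∀ (Lay : Layout) (_hLay : Lay.hi = 0x1000000) (μ : Microarch) (_hμ : UserX.MicroOK μ) (u₀ : State)
    (_hcode : HasCodeNat Lay u₀ Gif.L.DGifGetExtensionNext.entry Gif.Code.code_DGifGetExtensionNext.nat Gif.L.DGifGetExtensionNext.size),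
    Gif.Spec.DGifGetExtensionNext.SegE Lay μ u₀

end Gif.Spec.DGifGetExtensionNext_E
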